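-- pv_equiv track=rewrite | github.com/mestre88/Curso_Bases_Python_2 | Encontrando_Impares_em_uma_lista.py | encontra_impares
-- ===== SOURCE A (Python) =====
-- def  encontra_impares(lista):
--     if len(lista) == 1:
--         if lista[len(lista)-1] % 2 != 0:
--             return lista
--     if len(lista) < 1:
--         return lista
--     else:
--         while len(lista) > 0:
--             lista_impar = []
--             lista_corta = []
--             if lista[len(lista)-1] % 2 != 0:
--                 lista_impar.append(lista[len(lista)-1])
--             lista_corta = lista[:len(lista)-1]
--             return lista_impar + encontra_impares(lista_corta[:len(lista)])
-- ===== SOURCE B (Python) =====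
-- def encontra_impares(lista):
--     resultado = []
--     for x in reversed(lista):
--         if x % 2 != 0:
--             resultado.append(x)
--     return resultado
-- ===== Notes on version B (the rewrite author's own statement) =====
-- stated objective: faster
-- what changed: Replaces A's recursion (which copies a fresh slice of the list at every step and rebuilds the result with list concatenation) by a single iterative reverse pass with an accumulator list.
import Mathlib
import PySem

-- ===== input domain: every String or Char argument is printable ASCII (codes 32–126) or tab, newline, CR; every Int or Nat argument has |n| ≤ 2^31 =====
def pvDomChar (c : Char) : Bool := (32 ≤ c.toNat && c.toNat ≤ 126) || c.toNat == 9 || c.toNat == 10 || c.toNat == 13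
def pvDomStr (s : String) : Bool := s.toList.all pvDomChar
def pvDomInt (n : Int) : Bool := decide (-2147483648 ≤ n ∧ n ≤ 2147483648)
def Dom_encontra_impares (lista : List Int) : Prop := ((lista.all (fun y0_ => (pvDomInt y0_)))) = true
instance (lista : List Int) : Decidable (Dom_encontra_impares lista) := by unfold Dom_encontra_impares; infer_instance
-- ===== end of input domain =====

-- B replaces A's copy-slicing recursion by one iterative reverse pass with an accumulator (objective: simpler).

-- ===== PORT A =====
-- literal transliteration of A: nested length tests, then one pass of the 'while'
-- that slices lista[:len-1] and again [:len] before recursing.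
def encontra_impares (lista : List Int) : List Int :=
  if lista.length = 1 ∧ PySem.Int.mod (PySem.List.pyGetD lista ((lista.length : Int) - 1) 0) 2 ≠ 0 then
    lista
  else if lista.length < 1 then
    lista
  else
    let lista_impar : List Int :=
      if PySem.Int.mod (PySem.List.pyGetD lista ((lista.length : Int) - 1) 0) 2 ≠ 0 then
        [PySem.List.pyGetD lista ((lista.length : Int) - 1) 0]
      else []
    let lista_corta := PySem.List.slice lista none (some ((lista.length : Int) - 1))
    lista_impar ++ encontra_impares (PySem.List.slice lista_corta none (some ((lista.length : Int))))
termination_by lista.length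
decreasing_by
  rename_i _h1 h2
  have hc : ((lista.length : Int) - 1) = ((lista.length - 1 : Nat) : Int) := by omega
  simp only [hc, PySem.List.slice_to_natCast]
  simp [List.length_take]
  omega

-- ===== PORT B =====
-- Source B: resultado = []; for x in reversed(lista): if x % 2 != 0: resultado.append(x); return resultado
def encontra_impares_alt (lista : List Int) : List Int :=
  lista.reverse.foldl
    (fun resultado x => if PySem.Int.mod x 2 ≠ 0 then resultado ++ [x] else resultado) []

-- ===== PRECONDITION & SPEC =====
def Spec_encontra_impares (lista : List Int) (out : List Int) : Prop := out = encontra_impares_alt lista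
instance (lista : List Int) (out : List Int) : Decidable (Spec_encontra_impares lista out) := by unfold Spec_encontra_impares; infer_instance

-- ===== CLAIM (what is proved, stated in full; the proofs are below) =====
def Claim_equal_encontra_impares : Prop := ∀ (lista : List Int), Dom_encontra_impares lista → Spec_encontra_impares lista (encontra_impares lista)

-- ===== LEMMAS AND PROOFS =====

def podd (x : Int) : Bool := decide (PySem.Int.mod x 2 ≠ 0)

theorem mod_ne_iff (x : Int) : (PySem.Int.mod x 2 ≠ 0) ↔ x % 2 = 1 := by
  simp [PySem.Int.mod, Int.fmod_eq_emod]

theorem podd_true {x : Int} (h : PySem.Int.mod x 2 ≠ 0) : podd x = true := by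
  simp [podd]; exact (mod_ne_iff x).mp h

theorem podd_false {x : Int} (h : ¬ PySem.Int.mod x 2 ≠ 0) : podd x = false := by
  have h1 : x % 2 ≠ 1 := fun hx => h ((mod_ne_iff x).mpr hx)
  simp [podd]
  omega

theorem foldB (l acc : List Int) :
    l.foldl (fun resultado x => if PySem.Int.mod x 2 ≠ 0 then resultado ++ [x] else resultado) acc
      = acc ++ l.filter podd := by
  induction l generalizing acc with
  | nil => simp
  | cons x xs ih =>
    rw [List.foldl_cons, List.filter_cons]
    by_cases h : PySem.Int.mod x 2 ≠ 0
    · rw [if_pos h, ih]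
      rw [podd_true h, if_pos rfl]
      simp
    · rw [if_neg h, ih]
      rw [podd_false h]
      simp

theorem alt_eq (l : List Int) :
    encontra_impares_alt l = l.reverse.filter podd := by
  unfold encontra_impares_alt
  rw [foldB]
  simp

theorem A_eq : ∀ (n : Nat) (l : List Int), l.length ≤ n →
    encontra_impares l = l.reverse.filter podd := by
  intro n
  induction n with
  | zero =>
    intro l hl
    have : l = [] := List.eq_nil_of_length_eq_zero (by omega)
    subst this
    simp [encontra_impares]
  | succ n ih =>
    intro l hl
    cases l using List.reverseRecOn with
    | nil => simp [encontra_impares]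
    | append_singleton ys z =>
      have hlen : (ys ++ [z]).length = ys.length + 1 := by simp
      have hc : (((ys ++ [z]).length : Int) - 1) = ((ys.length : Nat) : Int) := by
        rw [hlen]; push_cast; ring
      have hlast : PySem.List.pyGetD (ys ++ [z]) (((ys ++ [z]).length : Int) - 1) 0 = z := by
        rw [hc, PySem.List.pyGetD_natCast]
        simp [List.getD]
      have hcorta : PySem.List.slice (ys ++ [z]) none (some (((ys ++ [z]).length : Int) - 1)) = ys := by
        rw [hc, PySem.List.slice_to_natCast]
        simp
      have hcorta2 : PySem.List.slice ys none (some (((ys ++ [z]).length : Int))) = ys := by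
        rw [PySem.List.slice_to_natCast]
        exact List.take_of_length_le (by omega)
      have hrec : encontra_impares ys = ys.reverse.filter podd := by
        apply ih; omega
      have hrev : (ys ++ [z]).reverse = z :: ys.reverse := by simp
      rw [encontra_impares]
      by_cases h1 : (ys ++ [z]).length = 1 ∧
          PySem.Int.mod (PySem.List.pyGetD (ys ++ [z]) (((ys ++ [z]).length : Int) - 1) 0) 2 ≠ 0
      · rw [if_pos h1]
        obtain ⟨hl1, hoddz⟩ := h1
        have hys : ys = [] := List.eq_nil_of_length_eq_zero (by omega)
        rw [hlast] at hoddz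
        subst hys
        simp [podd_true hoddz]
      · rw [if_neg h1, if_neg (by omega), hlast, hcorta]
        show ((if PySem.Int.mod z 2 ≠ 0 then [z] else []) ++
            encontra_impares (PySem.List.slice ys none (some (((ys ++ [z]).length : Int))))) =
          List.filter podd (ys ++ [z]).reverse
        rw [hcorta2, hrec, hrev, List.filter_cons]
        by_cases hodd : PySem.Int.mod z 2 ≠ 0
        · rw [if_pos hodd, podd_true hodd, if_pos rfl]
          simp
        · rw [if_neg hodd, podd_false hodd]
          simp

-- ===== VERDICT (by name: the statement is the Claim_ definition above) =====
theorem encontra_impares_spec : Claim_equal_encontra_impares := by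
  intro lista _
  unfold Spec_encontra_impares
  rw [alt_eq, A_eq lista.length lista le_rfl]
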